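-- pv_equiv track=rewrite | github.com/bo-work/EX-MSLC | preprocess_ids18.py | transform_ports_to_categorical
-- ===== SOURCE A (Python) =====
-- def transform_ports_to_categorical(ports, high_freq_port_list, medium_freq_port_list, low_freq_port_list):
--     ports_transform = []
--     for port in ports:
--         if port in high_freq_port_list:
--             ports_transform.append(0)
--         elif port in medium_freq_port_list:
--             ports_transform.append(1)
--         else:
--             ports_transform.append(2)
--     return ports_transform
-- ===== SOURCE B (Python) =====
-- def transform_ports_to_categorical(ports, high_freq_port_list, medium_freq_port_list, low_freq_port_list):
--     # Scatter/overwrite: index the positions of each port value once, start from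
--     # all "rare" (2), then overwrite positions of medium ports with 1 and finally
--     # positions of high ports with 0 (so high wins any overlap, as in the original).
--     positions = {}
--     for i, port in enumerate(ports):
--         positions.setdefault(port, []).append(i)
--     out = [2] * len(ports)
--     for p in medium_freq_port_list:
--         for i in positions.get(p, []):
--             out[i] = 1
--     for p in high_freq_port_list:
--         for i in positions.get(p, []):
--             out[i] = 0
--     return out
-- ===== Notes on version B (the rewrite author's own statement) =====
-- stated objective: faster
-- what changed: Inverts the iteration: instead of classifying each port by membership tests against the frequency lists, B indexes the positions of each port value once, initialises the whole result to 2, and then scatters 1 over the positions of medium-list ports and 0 over the positions of high-list ports (high pass last, so it wins overlaps).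
import Mathlib
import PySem

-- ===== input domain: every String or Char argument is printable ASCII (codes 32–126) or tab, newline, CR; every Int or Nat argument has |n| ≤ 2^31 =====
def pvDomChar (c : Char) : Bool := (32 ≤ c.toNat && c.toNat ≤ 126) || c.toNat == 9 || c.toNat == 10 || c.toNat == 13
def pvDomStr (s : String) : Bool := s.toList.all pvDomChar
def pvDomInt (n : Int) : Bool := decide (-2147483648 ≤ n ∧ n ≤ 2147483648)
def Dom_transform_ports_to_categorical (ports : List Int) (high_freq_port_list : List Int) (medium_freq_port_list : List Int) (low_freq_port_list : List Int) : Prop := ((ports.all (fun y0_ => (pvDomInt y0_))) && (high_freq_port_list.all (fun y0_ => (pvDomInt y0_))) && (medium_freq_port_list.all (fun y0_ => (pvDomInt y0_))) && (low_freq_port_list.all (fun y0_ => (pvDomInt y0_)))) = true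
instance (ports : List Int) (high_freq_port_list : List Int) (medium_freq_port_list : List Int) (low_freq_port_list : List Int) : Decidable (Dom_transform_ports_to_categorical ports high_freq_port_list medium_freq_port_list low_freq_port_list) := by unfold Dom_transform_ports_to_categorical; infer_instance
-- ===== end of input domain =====

-- B inverts the iteration: it indexes the positions of each port value once, fills the result with 2 and scatters 1 over medium-port positions then 0 over high-port positions (high last, so it wins overlaps); asymptotically faster than A's per-port membership tests.


-- ===== PORT A =====
def transform_ports_to_categorical (ports : List Int) (high_freq_port_list : List Int) (medium_freq_port_list : List Int) (low_freq_port_list : List Int) : List Int :=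
  ports.foldl (fun ports_transform port =>
    if high_freq_port_list.contains port then ports_transform ++ [0]
    else if medium_freq_port_list.contains port then ports_transform ++ [1]
    else ports_transform ++ [2]) []

-- ===== PORT B =====
-- positions: the 'positions' dict of Source B — port value ↦ list of its indices in ports (in order)
def pvPositions (ports : List Int) : PySem.Dict Int (List Nat) :=
  ports.zipIdx.foldl (fun d xi => d.insert xi.1 (d.getD xi.1 [] ++ [xi.2])) PySem.Dict.empty

-- one scatter pass of Source B: for p in plist: for i in positions.get(p, []): out[i] = v
def pvScatter (positions : PySem.Dict Int (List Nat)) (plist : List Int) (v : Int) (out : List Int) : List Int :=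
  plist.foldl (fun out p => (positions.getD p []).foldl (fun o i => o.set i v) out) out

def transform_ports_to_categorical_alt (ports : List Int) (high_freq_port_list : List Int) (medium_freq_port_list : List Int) (low_freq_port_list : List Int) : List Int :=
  let positions := pvPositions ports
  let out := List.replicate ports.length (2 : Int)
  let out := pvScatter positions medium_freq_port_list 1 out
  pvScatter positions high_freq_port_list 0 out

-- ===== PRECONDITION & SPEC =====
def Spec_transform_ports_to_categorical (ports : List Int) (high_freq_port_list : List Int) (medium_freq_port_list : List Int) (low_freq_port_list : List Int) (out : List Int) : Prop := out = transform_ports_to_categorical_alt ports high_freq_port_list medium_freq_port_list low_freq_port_list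
instance (ports : List Int) (high_freq_port_list : List Int) (medium_freq_port_list : List Int) (low_freq_port_list : List Int) (out : List Int) : Decidable (Spec_transform_ports_to_categorical ports high_freq_port_list medium_freq_port_list low_freq_port_list out) := by unfold Spec_transform_ports_to_categorical; infer_instance

-- ===== CLAIM (what is proved, stated in full; the proofs are below) =====
def Claim_equal_transform_ports_to_categorical : Prop := ∀ (ports : List Int) (high_freq_port_list : List Int) (medium_freq_port_list : List Int) (low_freq_port_list : List Int), Dom_transform_ports_to_categorical ports high_freq_port_list medium_freq_port_list low_freq_port_list → Spec_transform_ports_to_categorical ports high_freq_port_list medium_freq_port_list low_freq_port_list (transform_ports_to_categorical ports high_freq_port_list medium_freq_port_list low_freq_port_list)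

-- ===== LEMMAS AND PROOFS =====

-- the positions fold appends, per key, the indices carrying that key
theorem getD_positions_fold (l : List (Int × Nat)) (d : PySem.Dict Int (List Nat)) (p : Int) :
    (l.foldl (fun d xi => d.insert xi.1 (d.getD xi.1 [] ++ [xi.2])) d).getD p []
      = d.getD p [] ++ (l.filter (fun xi => xi.1 == p)).map Prod.snd := by
  induction l generalizing d with
  | nil => simp
  | cons x xs ih =>
    simp only [List.foldl_cons, ih, PySem.Dict.getD_insert, List.filter_cons]
    by_cases h : x.1 = p
    · simp [h]
    · simp [h, Ne.symm h]

-- membership in the positions list is exactly "ports[j] = p"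
theorem mem_positions (ports : List Int) (p : Int) (j : Nat) :
    j ∈ (pvPositions ports).getD p [] ↔ ports[j]? = some p := by
  unfold pvPositions
  rw [getD_positions_fold]
  simp only [PySem.Dict.getD_empty, List.nil_append, List.mem_map, List.mem_filter]
  constructor
  · rintro ⟨⟨x, i⟩, ⟨hmem, hx⟩, rfl⟩
    simp only [beq_iff_eq] at hx
    subst hx
    exact (List.mem_zipIdx_iff_getElem?).1 hmem
  · intro h
    exact ⟨(p, j), ⟨(List.mem_zipIdx_iff_getElem?).2 h, by simp⟩, rfl⟩

-- the inner write loop preserves length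
theorem length_foldl_set (idxs : List Nat) (v : Int) (out : List Int) :
    (idxs.foldl (fun o i => o.set i v) out).length = out.length := by
  induction idxs generalizing out with
  | nil => rfl
  | cons i rest ih => simp [ih]

-- element view of the inner write loop
theorem getElem?_foldl_set (idxs : List Nat) (v : Int) (out : List Int) (j : Nat) :
    (idxs.foldl (fun o i => o.set i v) out)[j]?
      = if j ∈ idxs ∧ j < out.length then some v else out[j]? := by
  induction idxs generalizing out with
  | nil => simp
  | cons i rest ih =>
    simp only [List.foldl_cons, ih, List.length_set, List.mem_cons, List.getElem?_set]
    by_cases hm : j ∈ rest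
    · by_cases hl : j < out.length
      · simp [hm, hl]
      · have hn : out[j]? = none := List.getElem?_eq_none (Nat.le_of_not_lt hl)
        simp only [hm, hl, hn, true_and, and_false, if_false, List.getElem?_set]
        split
        · rename_i h
          simp [h ▸ Nat.not_lt.1 hl, hn]
        · simp [hn]
    · by_cases hij : i = j
      · subst hij
        by_cases hl : i < out.length
        · simp [hm, hl]
        · simp [hm, hl, List.getElem?_eq_none (Nat.le_of_not_lt hl)]
      · simp only [hm, or_false, false_and, if_false]
        rw [if_neg hij]
        split
        · rename_i h
          exact absurd h.1.symm hij
        · rfl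

-- a scatter pass preserves length
theorem length_pvScatter (positions : PySem.Dict Int (List Nat)) (plist : List Int) (v : Int) (out : List Int) :
    (pvScatter positions plist v out).length = out.length := by
  unfold pvScatter
  induction plist generalizing out with
  | nil => rfl
  | cons p rest ih => simp [ih, length_foldl_set]

-- element view of a scatter pass over the real positions index
theorem getElem?_pvScatter (ports : List Int) (plist : List Int) (v : Int) (out : List Int) (j : Nat)
    (hlen : out.length = ports.length) :
    (pvScatter (pvPositions ports) plist v out)[j]?
      = if ∃ p ∈ plist, ports[j]? = some p then some v else out[j]? := by
  unfold pvScatter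
  induction plist generalizing out with
  | nil => simp
  | cons p rest ih =>
    simp only [List.foldl_cons]
    rw [ih _ (by rw [length_foldl_set, hlen])]
    rw [getElem?_foldl_set]
    simp only [mem_positions, hlen]
    cases hq : ports[j]? with
    | none => simp [hq]
    | some q =>
      have hj : j < ports.length := (List.getElem?_eq_some_iff.1 hq).1
      by_cases hr : q ∈ rest
      · simp [hq, hr, hj]
      · by_cases hp : q = p
        · simp [hq, hr, hp, hj]
        · simp [hq, hr, hp, hj, fun h : p = q => hp h.symm]

-- ===== VERDICT (by name: the statement is the Claim_ definition above) =====
theorem transform_ports_to_categorical_spec : Claim_equal_transform_ports_to_categorical := by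
  intro ports high medium low _
  unfold Spec_transform_ports_to_categorical transform_ports_to_categorical transform_ports_to_categorical_alt
  have hA : (fun (acc : List Int) (port : Int) =>
      if high.contains port then acc ++ [0]
      else if medium.contains port then acc ++ [1] else acc ++ [2])
      = fun acc port => acc ++ [if high.contains port then 0
        else if medium.contains port then 1 else 2] := by
    funext acc port; split_ifs <;> rfl
  rw [hA, PySem.List.foldl_append_singleton_eq_map]
  simp only [List.nil_append]
  apply List.ext_getElem?
  intro j
  rw [getElem?_pvScatter ports high 0 _ j
      (by rw [length_pvScatter]; simp),
    getElem?_pvScatter ports medium 1 _ j (by simp)]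
  cases hq : ports[j]? with
  | none =>
    have hj : ¬ j < ports.length := by
      simpa using List.getElem?_eq_none_iff.1 hq
    simp [hq, List.getElem?_map, List.getElem?_replicate, hj]
  | some q =>
    have hj : j < ports.length := (List.getElem?_eq_some_iff.1 hq).1
    have hq' : ports[j] = q := (List.getElem?_eq_some_iff.1 hq).2
    subst hq'
    by_cases hh : ports[j] ∈ high <;> by_cases hm : ports[j] ∈ medium <;>
      simp [hq, hj, hh, hm, List.getElem?_map, List.getElem?_replicate]
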